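-- pv_equiv track=rewrite | github.com/wijjo/jiig | jiig/util/git.py | find_url_by_name
-- ===== SOURCE A (Python) =====
-- from typing import Iterable
--
-- def repo_name_from_url(url: str) -> str:
--     """Extract repository name from URL.
--
--     Args:
--         url: repository URL
--
--     Returns:
--         repository name
--     """
--     name = url.split('/')[-1]
--     if name.endswith('.git'):
--         name = name[:-4]
--     return name
--
-- def find_url_by_name(urls: Iterable[str],
--                      name: str,
--                      partial: bool = False,
--                      ) -> str | None:
--     """Find URL by full or partial repository name.
--
--     Args:
--         urls: iterable URLs to search
--         name: full or partial name to search for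
--         partial: accept partial matches
--
--     Returns:
--         matched URL or None if not found
--     """
--     for url in urls:
--         extracted_name = repo_name_from_url(url)
--         if partial:
--             name_parts = url.split('/')[-1].split('.')
--             while name_parts:
--                 extracted_name = '.'.join(name_parts)
--                 if name.lower() == extracted_name.lower():
--                     return url
--                 name_parts = name_parts[:-1]
--         else:
--             if extracted_name == name:
--                 return url
--     return None
-- ===== SOURCE B (Python) =====
-- def find_url_by_name(urls, name, partial=False):
--     """Return the first URL whose repository name matches, else None."""
--     n = name.lower()
--     if partial:
--         def matches(url):
--             seg = url.split('/')[-1].lower()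
--             return seg == n or seg.startswith(n + '.')
--     else:
--         def matches(url):
--             seg = url.split('/')[-1]
--             if seg.endswith('.git'):
--                 seg = seg[:-4]
--             return seg == name
--     return next(filter(matches, urls), None)
-- ===== Notes on version B (the rewrite author's own statement) =====
-- stated objective: simpler
-- what changed: B replaces A's inner while loop (repeatedly re-joining a shrinking list of dot-separated parts) by a closed-form dot-boundary prefix test on the lowercased last URL segment, and expresses the outer scan as next(filter(...)); the non-partial branch keeps the exact '.git'-stripped comparison.
import Mathlib
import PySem

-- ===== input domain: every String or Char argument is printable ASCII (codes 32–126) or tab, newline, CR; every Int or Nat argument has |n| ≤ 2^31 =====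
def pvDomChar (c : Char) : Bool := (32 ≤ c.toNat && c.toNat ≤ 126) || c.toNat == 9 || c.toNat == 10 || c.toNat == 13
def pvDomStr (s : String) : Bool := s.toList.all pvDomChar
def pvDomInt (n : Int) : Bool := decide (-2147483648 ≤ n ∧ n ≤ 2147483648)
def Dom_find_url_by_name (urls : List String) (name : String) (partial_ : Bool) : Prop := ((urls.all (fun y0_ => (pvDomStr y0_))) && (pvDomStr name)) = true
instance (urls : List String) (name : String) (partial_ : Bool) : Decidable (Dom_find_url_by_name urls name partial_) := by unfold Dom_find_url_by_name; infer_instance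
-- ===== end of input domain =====

-- B replaces A's inner join-and-shrink while loop by a closed-form dot-boundary
-- prefix test on the raw last URL segment; objective: simpler.

-- ===== PORT A =====
-- url.split('/') has a non-empty separator (split? = some) and always yields a
-- non-empty list, so the '.getD' defaults below are never used.
def repo_name_from_url (url : String) : String :=
  let name := (PySem.List.pyGet? ((PySem.Str.split? url "/").getD []) (-1)).getD ""
  if PySem.Str.endswith name ".git" then PySem.Str.slice name none (some (-4)) else name

-- the 'while name_parts:' loop of A ('name_parts[:-1]' is the slice)
def find_url_by_name_while (url : String) (name : String) : List String → Option String
  | [] => none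
  | q :: qs =>
    let extracted_name := PySem.Str.join "." (q :: qs)
    if PySem.Str.lower name == PySem.Str.lower extracted_name then some url
    else find_url_by_name_while url name (PySem.List.slice (q :: qs) none (some (-1)))
termination_by parts => parts.length
decreasing_by simp [PySem.List.slice_to_neg_one]

def find_url_by_name (urls : List String) (name : String) (partial_ : Bool) : Option String :=
  match urls with
  | [] => none
  | url :: rest =>
    let extracted_name := repo_name_from_url url
    if partial_ then
      let name_parts :=
        (PySem.Str.split? ((PySem.List.pyGet? ((PySem.Str.split? url "/").getD []) (-1)).getD "") ".").getD []
      match find_url_by_name_while url name name_parts with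
      | some u => some u
      | none => find_url_by_name rest name partial_
    else
      if extracted_name == name then some url
      else find_url_by_name rest name partial_

-- ===== PORT B =====
def find_url_by_name_alt (urls : List String) (name : String) (partial_ : Bool) : Option String :=
  let n := PySem.Str.lower name
  if partial_ then
    urls.find? (fun url =>
      let seg := PySem.Str.lower ((PySem.List.pyGet? ((PySem.Str.split? url "/").getD []) (-1)).getD "")
      seg == n || PySem.Str.startswith seg (n ++ "."))
  else
    urls.find? (fun url =>
      let seg := (PySem.List.pyGet? ((PySem.Str.split? url "/").getD []) (-1)).getD ""
      (if PySem.Str.endswith seg ".git" then PySem.Str.slice seg none (some (-4)) else seg) == name)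

-- ===== PRECONDITION & SPEC =====
def Spec_find_url_by_name (urls : List String) (name : String) (partial_ : Bool) (out : Option String) : Prop := out = find_url_by_name_alt urls name partial_
instance (urls : List String) (name : String) (partial_ : Bool) (out : Option String) : Decidable (Spec_find_url_by_name urls name partial_ out) := by unfold Spec_find_url_by_name; infer_instance

-- ===== CLAIM (what is proved, stated in full; the proofs are below) =====
def Claim_equal_find_url_by_name : Prop := ∀ (urls : List String) (name : String) (partial_ : Bool), Dom_find_url_by_name urls name partial_ → Spec_find_url_by_name urls name partial_ (find_url_by_name urls name partial_)

-- ===== LEMMAS AND PROOFS =====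

-- lowering a character yields '.' only for '.' itself
theorem lowerChar_eq_dot {c : Char} (h : PySem.Chars.lowerChar c = '.') : c = '.' := by
  unfold PySem.Chars.lowerChar at h
  split at h
  · exfalso
    rename_i hu
    simp [PySem.Chars.isupper] at hu
    have h1 : 65 ≤ c.toNat := by
      have := hu.1; rw [Char.le_def, UInt32.le_iff_toNat_le] at this; exact this
    have h2 : c.toNat ≤ 90 := by
      have := hu.2; rw [Char.le_def, UInt32.le_iff_toNat_le] at this; exact this
    have hval : (c.toNat + 32).isValidChar := by left; omega
    have ht : (Char.ofNat (c.toNat + 32)).toNat = c.toNat + 32 := by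
      rw [Char.toNat_ofNat]; simp [hval]
    rw [h] at ht
    have hd : ('.' : Char).toNat = 46 := by decide
    omega
  · exact h

theorem dot_not_mem_lower {p : List Char} (h : '.' ∉ p) : '.' ∉ PySem.Chars.lower p := by
  simp only [PySem.Chars.lower, List.mem_map]
  rintro ⟨c, hc, hl⟩
  exact h (lowerChar_eq_dot hl ▸ hc)

-- structural recursion computing s.split('.')
def splitDot : List Char → List (List Char)
  | [] => [[]]
  | c :: rest =>
    if c = '.' then [] :: splitDot rest
    else
      match splitDot rest with
      | [] => [[c]]
      | p :: ps => (c :: p) :: ps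

theorem splitDot_ne_nil (s : List Char) : splitDot s ≠ [] := by
  cases s with
  | nil => simp [splitDot]
  | cons c rest =>
    simp only [splitDot]
    split
    · simp
    · cases h : splitDot rest <;> simp

theorem splitOn_go_eq (fuel : Nat) :
    ∀ (l cur acc : _), l.length < fuel →
      PySem.Chars.splitOn.go ['.'] fuel l cur acc =
        acc.reverse ++ (cur.reverse ++ (splitDot l).headI) :: (splitDot l).tail := by
  induction fuel with
  | zero => intro l cur acc h; omega
  | succ fuel ih =>
    intro l cur acc h
    cases l with
    | nil =>
      simp [PySem.Chars.splitOn.go, splitDot]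
    | cons c rest =>
      rw [PySem.Chars.splitOn.go]
      by_cases hc : c = '.'
      · subst hc
        have hpre : ['.'].isPrefixOf ('.' :: rest) = true := by simp [List.isPrefixOf]
        rw [if_pos hpre]
        simp only [List.length_singleton, List.drop_one, List.tail_cons]
        rw [ih rest [] (cur.reverse :: acc) (by simpa using Nat.lt_of_succ_lt_succ h)]
        obtain ⟨p, ps, hps⟩ := List.exists_cons_of_ne_nil (splitDot_ne_nil rest)
        simp [splitDot, hps]
      · have hpre : ['.'].isPrefixOf (c :: rest) = false := by
          simp [List.isPrefixOf]; exact fun hh => absurd hh.symm hc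
        rw [if_neg (by simp [hpre])]
        rw [ih rest (c :: cur) acc (by simpa using Nat.lt_of_succ_lt_succ h)]
        obtain ⟨p, ps, hps⟩ := List.exists_cons_of_ne_nil (splitDot_ne_nil rest)
        simp [splitDot, hps, hc]

theorem splitOn_dot_eq (s : List Char) : PySem.Chars.splitOn s ['.'] = splitDot s := by
  unfold PySem.Chars.splitOn
  rw [splitOn_go_eq (s.length + 1) s [] [] (by omega)]
  obtain ⟨p, ps, hps⟩ := List.exists_cons_of_ne_nil (splitDot_ne_nil s)
  simp [hps]

theorem join_splitDot (s : List Char) : PySem.Chars.join ['.'] (splitDot s) = s := by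
  induction s with
  | nil => simp [splitDot, PySem.Chars.join_singleton]
  | cons c rest ih =>
    obtain ⟨p, ps, hps⟩ := List.exists_cons_of_ne_nil (splitDot_ne_nil rest)
    by_cases hc : c = '.'
    · subst hc
      have h1 : splitDot ('.' :: rest) = [] :: p :: ps := by simp [splitDot, hps]
      rw [h1, PySem.Chars.join_cons_cons, ← hps, ih]
      simp
    · have h1 : splitDot (c :: rest) = (c :: p) :: ps := by simp [splitDot, hps, hc]
      rw [h1]
      rw [hps] at ih
      cases ps with
      | nil =>
        rw [PySem.Chars.join_singleton] at ih ⊢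
        simp [ih]
      | cons q t =>
        rw [PySem.Chars.join_cons_cons] at ih ⊢
        simp [ih]

theorem dotFree_splitDot (s : List Char) : ∀ p ∈ splitDot s, '.' ∉ p := by
  induction s with
  | nil => simp [splitDot]
  | cons c rest ih =>
    obtain ⟨p, ps, hps⟩ := List.exists_cons_of_ne_nil (splitDot_ne_nil rest)
    by_cases hc : c = '.'
    · subst hc
      simp only [splitDot]
      intro q hq
      rcases List.mem_cons.mp hq with h | h
      · simp [h]
      · exact ih q h
    · simp only [splitDot, if_neg hc, hps]
      intro q hq
      rcases List.mem_cons.mp hq with h | h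
      · subst h
        intro hm
        rcases List.mem_cons.mp hm with h | h
        · exact hc h.symm
        · exact ih p (by simp [hps]) h
      · exact ih q (by simp [hps, h])

theorem join_concat (sep p : List Char) :
    ∀ ps, ps ≠ [] → PySem.Chars.join sep (ps ++ [p]) = PySem.Chars.join sep ps ++ sep ++ p := by
  intro ps
  induction ps with
  | nil => simp
  | cons q t ih =>
    intro _
    cases t with
    | nil => simp [PySem.Chars.join_cons_cons, PySem.Chars.join_singleton]
    | cons r u =>
      have h2 := ih (by simp)
      simp only [List.cons_append] at h2 ⊢
      rw [PySem.Chars.join_cons_cons, PySem.Chars.join_cons_cons, h2]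
      simp

theorem prefix_base {p n : List Char} (hp : '.' ∉ p) : ¬ (n ++ ['.'] <+: p) := by
  intro h
  exact hp (h.subset (by simp))

theorem prefix_step {L p n : List Char} (hp : '.' ∉ p) :
    (n ++ ['.'] <+: L ++ '.' :: p) ↔ (L = n ∨ n ++ ['.'] <+: L) := by
  constructor
  · intro h
    rcases Nat.lt_trichotomy n.length L.length with hlt | heq | hgt
    · right
      have hL : L <+: L ++ '.' :: p := List.prefix_append _ _
      rcases List.prefix_or_prefix_of_prefix h hL with h1 | h2
      · exact h1
      · have hh := h2.length_le
        simp at hh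
        have he : L = n ++ ['.'] := h2.eq_of_length (by simp; omega)
        rw [he]
    · left
      have hn : n <+: L ++ '.' :: p := ((List.prefix_append n ['.']).trans h)
      have hL : L <+: L ++ '.' :: p := List.prefix_append _ _
      rcases List.prefix_or_prefix_of_prefix hn hL with h1 | h2
      · exact (h1.eq_of_length (by omega)).symm
      · exact (h2.eq_of_length (by omega))
    · exfalso
      have hLd : L ++ ['.'] <+: L ++ '.' :: p := ⟨p, by simp⟩
      have hLn : L ++ ['.'] <+: n := by
        rcases List.prefix_or_prefix_of_prefix hLd h with h1 | h2
        · have hn : n <+: n ++ ['.'] := List.prefix_append _ _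
          rcases List.prefix_or_prefix_of_prefix h1 hn with h3 | h4
          · exact h3
          · have hh := h4.length_le
            simp at hh
            have he : n = L ++ ['.'] := h4.eq_of_length (by simp; omega)
            rw [he]
        · exfalso; have hh := h2.length_le; simp at hh; omega
      obtain ⟨n', hn'⟩ := hLn
      rw [← hn'] at h
      have h' : (L ++ ['.']) ++ (n' ++ ['.']) <+: (L ++ ['.']) ++ p := by
        simpa [List.append_assoc] using h
      exact prefix_base hp ((List.prefix_append_right_inj _).mp h')
  · intro h
    rcases h with h | h
    · subst h
      exact ⟨p, by simp⟩
    · exact h.trans (List.prefix_append _ _)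

-- lowering distributes over append; needed below
theorem lower_append (a b : List Char) :
    PySem.Chars.lower (a ++ b) = PySem.Chars.lower a ++ PySem.Chars.lower b := by
  simp [PySem.Chars.lower]

-- A's while loop, characterised by B's closed-form test
theorem while_char (url name : String) :
    ∀ (parts : List String), parts ≠ [] → (∀ p ∈ parts, '.' ∉ p.toList) →
      find_url_by_name_while url name parts =
        if (PySem.Chars.lower ((PySem.Str.join "." parts).toList) = (PySem.Str.lower name).toList
            ∨ ((PySem.Str.lower name).toList ++ ['.']) <+: PySem.Chars.lower ((PySem.Str.join "." parts).toList))
        then some url else none := by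
  intro parts
  induction parts using List.reverseRecOn with
  | nil => intro h; exact absurd rfl h
  | append_singleton ps p ih =>
    intro _ hdf
    have hpdot : '.' ∉ PySem.Chars.lower p.toList :=
      dot_not_mem_lower (hdf p (by simp))
    cases ps with
    | nil =>
      have hJ : (PySem.Str.join "." [p]).toList = p.toList := by
        simp [PySem.Str.toList_join, PySem.Chars.join_singleton]
      have hnp : ¬ (((PySem.Str.lower name).toList ++ ['.']) <+: PySem.Chars.lower p.toList) :=
        prefix_base hpdot
      simp only [List.nil_append]
      rw [find_url_by_name_while]
      by_cases hc : PySem.Str.lower name = PySem.Str.lower (PySem.Str.join "." [p])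
      · rw [if_pos (by simp [hc]), if_pos]
        left
        have := congrArg String.toList hc
        simp only [PySem.Str.toList_lower, hJ] at this
        simp [PySem.Str.toList_lower, hJ, this]
      · rw [if_neg (by simp [hc])]
        rw [PySem.List.slice_to_neg_one]
        simp only [List.dropLast_singleton]
        rw [find_url_by_name_while]
        rw [if_neg]
        simp only [PySem.Str.toList_lower] at hnp ⊢
        simp only [hJ]
        rintro (h | h)
        · apply hc
          apply String.toList_inj.mp
          simp [PySem.Str.toList_lower, hJ, h.symm]
        · exact hnp h
    | cons q qs =>
      simp only [List.cons_append]
      have hne : q :: qs ≠ [] := by simp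
      have hJall : (PySem.Str.join "." (q :: (qs ++ [p]))).toList
          = (PySem.Str.join "." (q :: qs)).toList ++ ['.'] ++ p.toList := by
        simp only [PySem.Str.toList_join, List.map_append, List.map_cons, List.map_nil]
        have hjc := join_concat ".".toList p.toList (q.toList :: List.map String.toList qs) (by simp)
        simpa using hjc
      have hdf' : ∀ r ∈ q :: qs, '.' ∉ r.toList := by
        intro r hr
        apply hdf
        simp at hr ⊢
        tauto
      have hdl : (q :: (qs ++ [p])).dropLast = q :: qs := by
        rw [← List.cons_append, List.dropLast_concat]
      have hlowall : PySem.Chars.lower (PySem.Str.join "." (q :: (qs ++ [p]))).toList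
          = PySem.Chars.lower (PySem.Str.join "." (q :: qs)).toList ++ '.' :: PySem.Chars.lower p.toList := by
        rw [hJall, lower_append, lower_append]
        simp [show PySem.Chars.lower ['.'] = ['.'] from by decide]
      have hstep := prefix_step (L := PySem.Chars.lower (PySem.Str.join "." (q :: qs)).toList)
          (n := (PySem.Str.lower name).toList) hpdot
      rw [find_url_by_name_while.eq_2, PySem.List.slice_to_neg_one, hdl, ih hne hdf']
      by_cases h1 : PySem.Str.lower name = PySem.Str.lower (PySem.Str.join "." (q :: (qs ++ [p])))
      · rw [if_pos (by simp [h1]), if_pos]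
        left
        have := congrArg String.toList h1
        simp only [PySem.Str.toList_lower] at this ⊢
        exact this.symm
      · rw [if_neg (by simp [h1])]
        by_cases h2 : (PySem.Chars.lower (PySem.Str.join "." (q :: qs)).toList = (PySem.Str.lower name).toList
            ∨ ((PySem.Str.lower name).toList ++ ['.']) <+: PySem.Chars.lower (PySem.Str.join "." (q :: qs)).toList)
        · rw [if_pos h2, if_pos]
          right
          rw [hlowall]
          apply hstep.mpr
          rcases h2 with h | h
          · exact Or.inl h
          · exact Or.inr h
        · rw [if_neg h2, if_neg]
          rintro (h | h)
          · apply h1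
            apply String.toList_inj.mp
            simp only [PySem.Str.toList_lower] at h ⊢
            exact h.symm
          · rw [hlowall] at h
            rcases hstep.mp h with h3 | h4
            · exact h2 (Or.inl h3)
            · exact h2 (Or.inr h4)

-- one step of next(filter(...)) / List.find?
theorem find?_cons_eq {α : Type} (p : α → Bool) (a : α) (l : List α) :
    List.find? p (a :: l) = if p a then some a else List.find? p l := by
  by_cases h : p a = true
  · rw [List.find?_cons_of_pos h, if_pos h]
  · rw [List.find?_cons_of_neg (by simpa using h), if_neg h]

-- the two per-URL tests agree, and both scans agree
set_option maxHeartbeats 1600000 in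
theorem find_url_by_name_eq_alt (name : String) (partial_ : Bool) :
    ∀ urls, find_url_by_name urls name partial_ = find_url_by_name_alt urls name partial_ := by
  intro urls
  induction urls with
  | nil => cases partial_ <;> rfl
  | cons url rest ih =>
    cases partial_ with
    | false =>
      simp only [find_url_by_name, find_url_by_name_alt, repo_name_from_url,
        Bool.false_eq_true, if_false] at ih ⊢
      rw [find?_cons_eq]
      by_cases hb : ((if PySem.Str.endswith ((PySem.List.pyGet? ((PySem.Str.split? url "/").getD []) (-1)).getD "") ".git"
          then PySem.Str.slice ((PySem.List.pyGet? ((PySem.Str.split? url "/").getD []) (-1)).getD "") none (some (-4))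
          else (PySem.List.pyGet? ((PySem.Str.split? url "/").getD []) (-1)).getD "") == name) = true
      · rw [if_pos hb, if_pos hb]
      · rw [if_neg hb, if_neg hb, ih]
    | true =>
      simp only [find_url_by_name, find_url_by_name_alt, if_true] at ih ⊢
      rw [find?_cons_eq]
      generalize hsg : (PySem.List.pyGet? ((PySem.Str.split? url "/").getD []) (-1)).getD "" = sg
      have hparts : (PySem.Str.split? sg ".").getD [] = (splitDot sg.toList).map String.ofList := by
        simp [PySem.Str.split?, PySem.Chars.split?, splitOn_dot_eq]
      have h1 : (splitDot sg.toList).map String.ofList ≠ [] := by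
        simp [splitDot_ne_nil]
      have h2 : ∀ r ∈ (splitDot sg.toList).map String.ofList, '.' ∉ r.toList := by
        intro r hr
        simp only [List.mem_map] at hr
        obtain ⟨cs, hcs, hr⟩ := hr
        rw [← hr, String.toList_ofList]
        exact dotFree_splitDot sg.toList cs hcs
      have hjoin : (PySem.Str.join "." ((splitDot sg.toList).map String.ofList)).toList = sg.toList := by
        rw [PySem.Str.toList_join, List.map_map]
        have hco : (String.toList ∘ String.ofList) = id := by
          funext l; simp [String.toList_ofList]
        rw [hco, List.map_id]
        exact join_splitDot sg.toList
      have hwc := while_char url name ((splitDot sg.toList).map String.ofList) h1 h2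
      rw [hjoin] at hwc
      rw [hparts, hwc]
      have hB : ((PySem.Str.lower sg == PySem.Str.lower name
            || PySem.Str.startswith (PySem.Str.lower sg) (PySem.Str.lower name ++ ".")) = true)
          ↔ (PySem.Chars.lower sg.toList = (PySem.Str.lower name).toList
            ∨ ((PySem.Str.lower name).toList ++ ['.']) <+: PySem.Chars.lower sg.toList) := by
        simp only [Bool.or_eq_true, beq_iff_eq]
        constructor
        · rintro (h | h)
          · left
            have := congrArg String.toList h
            simpa [PySem.Str.toList_lower] using this
          · right
            have := (PySem.Chars.startswith_iff _ _).mp (by simpa [PySem.Str.startswith_eq] using h)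
            simpa [PySem.Str.toList_lower, String.toList_append] using this
        · rintro (h | h)
          · left
            apply String.toList_inj.mp
            simpa [PySem.Str.toList_lower] using h
          · right
            rw [PySem.Str.startswith_eq]
            apply (PySem.Chars.startswith_iff _ _).mpr
            simpa [PySem.Str.toList_lower, String.toList_append] using h
      by_cases hP : (PySem.Chars.lower sg.toList = (PySem.Str.lower name).toList
            ∨ ((PySem.Str.lower name).toList ++ ['.']) <+: PySem.Chars.lower sg.toList)
      · rw [if_pos hP, if_pos (hB.mpr hP)]
      · rw [if_neg hP, if_neg (fun hh => hP (hB.mp hh)), ih]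

-- ===== VERDICT (by name: the statement is the Claim_ definition above) =====
theorem find_url_by_name_spec : Claim_equal_find_url_by_name := by
  intro urls name partial_ _
  unfold Spec_find_url_by_name
  exact find_url_by_name_eq_alt name partial_ urls
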